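-- pv_equiv track=rewrite | github.com/mvp-krayu/krayu-program-intelligence | pios/core/v0.1/adapters/demo_compat/map_core_to_demo.py | derive_sig_002_state
-- ===== SOURCE A (Python) =====
-- def derive_sig_002_state(intel_entries):
--     """
--     Derive Demo SIG-002 synthesis_state and relevance from Core INTEL aggregate. A9.
--
--     Logic:
--       - If any Core INTEL is blocked: SIG-002 state = "synthesized" (the unknown
--         space is fully declared; blocking is deterministic, not a gap in the adapter).
--       - If no blocked but partial exist: state = "partial" (some dims partially known).
--       - If all synthesized: state = "synthesized" (all dims resolved; SIG-002 as
--         unknown-space declaration is vacuous but still present).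
--     """
--     blocked = [k for k, v in intel_entries.items() if v["synthesis_state"] == "blocked"]
--     partial  = [k for k, v in intel_entries.items() if v["synthesis_state"] == "partial"]
--
--     if blocked:
--         return "synthesized", "HIGH"   # Unknown space fully declared from blocked set
--     if partial:
--         return "partial", "MEDIUM"     # Unknown space partially declared
--     return "synthesized", "LOW"        # All resolved; unknown-space signal vacuous
-- ===== SOURCE B (Python) =====
-- _RANK = {"blocked": 2, "partial": 1}
-- _OUT = {2: ("synthesized", "HIGH"), 1: ("partial", "MEDIUM"), 0: ("synthesized", "LOW")}
--
-- def derive_sig_002_state(intel_entries):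
--     sev = max((_RANK.get(v["synthesis_state"], 0) for v in intel_entries.values()), default=0)
--     return _OUT[sev]
-- ===== Notes on version B (the rewrite author's own statement) =====
-- stated objective: alternative
-- what changed: Replaces the two list comprehensions plus priority branch by mapping each entry's synthesis_state to a numeric severity rank, reducing with max, and looking the result up in a rank->output table.
-- outside the precondition, e.g. on derive_sig_002_state({'a': {}}): A raises KeyError, B raises KeyError
import Mathlib
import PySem

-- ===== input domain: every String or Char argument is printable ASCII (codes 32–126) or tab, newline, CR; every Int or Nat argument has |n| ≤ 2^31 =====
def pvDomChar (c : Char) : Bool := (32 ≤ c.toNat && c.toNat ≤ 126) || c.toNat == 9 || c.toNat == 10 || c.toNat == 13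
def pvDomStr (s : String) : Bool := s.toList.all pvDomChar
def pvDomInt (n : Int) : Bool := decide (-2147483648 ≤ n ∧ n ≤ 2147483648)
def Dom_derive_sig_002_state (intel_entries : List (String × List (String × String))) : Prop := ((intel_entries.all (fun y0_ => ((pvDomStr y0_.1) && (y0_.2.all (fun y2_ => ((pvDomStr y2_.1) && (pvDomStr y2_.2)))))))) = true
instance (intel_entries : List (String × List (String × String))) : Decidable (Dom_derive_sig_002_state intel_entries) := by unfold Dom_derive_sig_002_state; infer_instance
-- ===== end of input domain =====

-- B maps each entry to a numeric severity rank, reduces with max and reads a rank→output table;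
-- objective: alternative (same cost, different algorithm: max-reduction instead of list filters + branches).

-- ===== PORT A =====
-- v["synthesis_state"]: dict lookup = first match in the assoc list; Pre_ guarantees the key is present,
-- so the port reads it with a default (never reached inside Pre_).
def pvSyn (v : List (String × String)) : String :=
  ((v.find? (fun p => p.1 == "synthesis_state")).map Prod.snd).getD ""

def derive_sig_002_state (intel_entries : List (String × List (String × String))) : String × String :=
  let blocked := (intel_entries.filter (fun kv => pvSyn kv.2 == "blocked")).map Prod.fst
  let partial_ := (intel_entries.filter (fun kv => pvSyn kv.2 == "partial")).map Prod.fst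
  if blocked.isEmpty = false then ("synthesized", "HIGH")
  else if partial_.isEmpty = false then ("partial", "MEDIUM")
  else ("synthesized", "LOW")

-- ===== PORT B =====
-- _RANK.get(s, 0)
def pvRank (s : String) : Int :=
  if s == "blocked" then 2 else if s == "partial" then 1 else 0

-- the _OUT table, as an assoc list; sev is always 0, 1 or 2, so the default is never reached
def pvOutTable : List (Int × (String × String)) :=
  [(2, ("synthesized", "HIGH")), (1, ("partial", "MEDIUM")), (0, ("synthesized", "LOW"))]

def derive_sig_002_state_alt (intel_entries : List (String × List (String × String))) : String × String :=
  -- max(generator, default=0) = fold max over the mapped ranks starting from 0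
  let sev := (intel_entries.map (fun kv => pvRank (pvSyn kv.2))).foldl max 0
  (((pvOutTable.find? (fun p => p.1 == sev)).map Prod.snd).getD ("", ""))

-- ===== PRECONDITION & SPEC =====
-- Pre_ excludes entries missing the "synthesis_state" key, on which both A and B raise KeyError, and
-- assoc lists with duplicate keys (outer or inner), on which the Python dict they denote is ambiguous
-- (duplicates collapse before either function runs, so the assoc-list representation is not faithful).
def Pre_derive_sig_002_state (intel_entries : List (String × List (String × String))) : Prop :=
  (intel_entries.map Prod.fst).Nodup ∧
  ∀ kv ∈ intel_entries, (kv.2.map Prod.fst).Nodup ∧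
    (kv.2.find? (fun p => p.1 == "synthesis_state")).isSome = true
instance (intel_entries : List (String × List (String × String))) : Decidable (Pre_derive_sig_002_state intel_entries) := by unfold Pre_derive_sig_002_state; infer_instance

def pvWitness_derive_sig_002_state : (List (String × List (String × String))) :=
  [("a", [("synthesis_state", "partial")]), ("b", [("synthesis_state", "blocked")])]

def Spec_derive_sig_002_state (intel_entries : List (String × List (String × String))) (out : String × String) : Prop := out = derive_sig_002_state_alt intel_entries
instance (intel_entries : List (String × List (String × String))) (out : String × String) : Decidable (Spec_derive_sig_002_state intel_entries out) := by unfold Spec_derive_sig_002_state; infer_instance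

-- ===== CLAIM (what is proved, stated in full; the proofs are below) =====
def Claim_equal_derive_sig_002_state : Prop := ∀ (intel_entries : List (String × List (String × String))), Dom_derive_sig_002_state intel_entries → Pre_derive_sig_002_state intel_entries → Spec_derive_sig_002_state intel_entries (derive_sig_002_state intel_entries)

-- ===== LEMMAS AND PROOFS =====

-- the severity A's branching corresponds to
def pvSev (l : List (String × List (String × String))) : Int :=
  if l.any (fun kv => pvSyn kv.2 == "blocked") then 2
  else if l.any (fun kv => pvSyn kv.2 == "partial") then 1
  else 0

lemma foldl_max_rank (l : List (String × List (String × String))) (a : Int) (ha : 0 ≤ a) :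
    (l.map (fun kv => pvRank (pvSyn kv.2))).foldl max a = max a (pvSev l) := by
  induction l generalizing a with
  | nil => simp [pvSev]; omega
  | cons h t ih =>
    simp only [List.map_cons, List.foldl_cons]
    rw [ih (max a (pvRank (pvSyn h.2))) (le_trans ha (le_max_left _ _))]
    unfold pvSev pvRank
    simp only [List.any_cons]
    by_cases hb : (pvSyn h.2 == "blocked") = true <;>
      by_cases hp : (pvSyn h.2 == "partial") = true <;>
        by_cases hbt : (t.any fun kv => pvSyn kv.2 == "blocked") = true <;>
          by_cases hpt : (t.any fun kv => pvSyn kv.2 == "partial") = true <;>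
            simp [hb, hp, hbt, hpt, max_eq_left ha] <;> norm_num

lemma filter_map_isEmpty (l : List (String × List (String × String)))
    (p : String × List (String × String) → Bool) :
    ((l.filter p).map Prod.fst).isEmpty = !(l.any p) := by
  induction l with
  | nil => simp
  | cons h t ih =>
    by_cases hp : p h = true <;> simp [hp, ih]

-- ===== VERDICT (by name: the statement is the Claim_ definition above) =====
theorem derive_sig_002_state_spec : Claim_equal_derive_sig_002_state := by
  intro l _ _
  show derive_sig_002_state l = derive_sig_002_state_alt l
  unfold derive_sig_002_state derive_sig_002_state_alt
  simp only [filter_map_isEmpty, foldl_max_rank l 0 le_rfl]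
  unfold pvSev
  cases hb : l.any (fun kv => pvSyn kv.2 == "blocked") <;>
    cases hp : l.any (fun kv => pvSyn kv.2 == "partial") <;>
      simp [pvOutTable]
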